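-- pv_equiv track=rewrite | github.com/Lei-DaQQ/algo_learning | leetcode/ddmasvxllu/src_字符串/151.py | moveSpace
-- ===== SOURCE A (Python) =====
-- def moveSpace(str: list):
--     start = 0
--     idx = 0
--     length = len(str)
--     while idx < length:
--         while idx < length and str[idx] == ' ':
--             idx += 1
--         # new word
--
--         while idx < length and str[idx] != ' ':
--             str[start] = str[idx]
--             start += 1
--             idx += 1
--         if idx < length:
--             str[start] = ' '
--             start += 1  # a space
--     return start  # new length
-- ===== SOURCE B (Python) =====
-- def moveSpace(str: list):
--     words = []
--     cur = []
--     for ch in str: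
--         if ch == ' ':
--             if cur:
--                 words.append(cur)
--                 cur = []
--         else:
--             cur.append(ch)
--     if cur:
--         words.append(cur)
--     n = sum(len(w) for w in words) + max(len(words) - 1, 0)
--     i = 0
--     for j, w in enumerate(words):
--         if j:
--             str[i] = ' '
--             i += 1
--         for ch in w:
--             str[i] = ch
--             i += 1
--     return n
-- ===== Notes on version B (the rewrite author's own statement) =====
-- stated objective: idiomatic
-- what changed: Replaces the in-place two-pointer compaction scan with a tokenize-and-rebuild pass: collect the words (maximal runs of non-space elements), then the result length is the total word length plus one separator between consecutive words.
-- intended difference: On lists that contain a non-space element and end with the element ' ', A keeps one trailing space and returns the compacted length plus 1, while B returns the length with no trailing space, which is the intended 'remove extra spaces' behaviour (LeetCode 151 style). — e.g. on moveSpace(["a", " "]): A returns 2, B returns 1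
import Mathlib
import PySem

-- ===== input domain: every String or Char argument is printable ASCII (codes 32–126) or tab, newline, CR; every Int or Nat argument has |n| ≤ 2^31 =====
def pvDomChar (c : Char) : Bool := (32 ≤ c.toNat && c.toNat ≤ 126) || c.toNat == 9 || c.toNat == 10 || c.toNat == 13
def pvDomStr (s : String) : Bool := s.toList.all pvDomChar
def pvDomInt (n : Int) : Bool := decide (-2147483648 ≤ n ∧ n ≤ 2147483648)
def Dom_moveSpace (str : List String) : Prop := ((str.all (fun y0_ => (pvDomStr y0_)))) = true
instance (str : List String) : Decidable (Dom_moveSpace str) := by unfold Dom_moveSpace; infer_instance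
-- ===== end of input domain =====

-- B replaces A's in-place two-pointer compaction with a tokenize-and-rebuild pass
-- (collect words, sum their lengths, add one separator between consecutive words);
-- equivalence is about the RETURN value only: A mutates its argument in place
-- (and leaves tail garbage), B writes the compacted content back without A's trailing space.


-- ===== PORT A =====
-- inner `while idx < length and str[idx] == ' '` loop; fuel (= length+1 at call sites)
-- only makes the recursion structural and is never exhausted
def pvSkip : Nat → List String → Nat → Nat
  | 0, _, idx => idx
  | fuel+1, arr, idx =>
    if idx < arr.length ∧ arr.getD idx "" = " " then pvSkip fuel arr (idx+1) else idx

-- inner `while idx < length and str[idx] != ' '` loop with its writes `str[start] = str[idx]`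
def pvCopy : Nat → List String → Nat → Nat → List String × Nat × Nat
  | 0, arr, start, idx => (arr, start, idx)
  | fuel+1, arr, start, idx =>
    if idx < arr.length ∧ ¬ arr.getD idx "" = " " then
      pvCopy fuel (arr.set start (arr.getD idx "")) (start+1) (idx+1)
    else (arr, start, idx)

-- outer `while idx < length` loop
def pvOuter : Nat → List String → Nat → Nat → Nat
  | 0, _, start, _ => start
  | fuel+1, arr, start, idx =>
    if idx < arr.length then
      match pvCopy (arr.length+1) arr start (pvSkip (arr.length+1) arr idx) with
      | (arr2, start2, idx2) =>
        if idx2 < arr2.length then pvOuter fuel (arr2.set start2 " ") (start2+1) idx2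
        else start2
    else start

def moveSpace (str : List String) : Int :=
  Int.ofNat (pvOuter (str.length+1) str 0 0)

-- ===== PORT B =====
-- loop body of Source B's word-collecting pass: state (words, cur)
def pvStep (st : List (List String) × List String) (ch : String) : List (List String) × List String :=
  if ch = " " then (if st.2 = [] then st else (st.1 ++ [st.2], [])) else (st.1, st.2 ++ [ch])

def moveSpace_alt (str : List String) : Int :=
  let st := str.foldl pvStep ([], [])
  let words := if st.2 = [] then st.1 else st.1 ++ [st.2]
  (words.map (fun w => (w.length : Int))).sum + max ((words.length : Int) - 1) 0

-- ===== PRECONDITION & SPEC =====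
-- On lists that contain a non-space element and end with the element ' ', A keeps one
-- trailing space (returns the compacted length plus 1), while B returns the length with
-- no trailing space, the intended 'remove extra spaces' behaviour.
def D_moveSpace (str : List String) : Prop :=
  (∃ x ∈ str, x ≠ " ") ∧ str.getLast? = some " "
instance (str : List String) : Decidable (D_moveSpace str) := by unfold D_moveSpace; infer_instance

def Spec_moveSpace (str : List String) (out : Int) : Prop :=
  ¬ D_moveSpace str → out = moveSpace_alt str
instance (str : List String) (out : Int) : Decidable (Spec_moveSpace str out) := by unfold Spec_moveSpace; infer_instance

def pvDiffWitness_moveSpace : List String := ["a", " "]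
def pvDiffWitnessOut_moveSpace : Int × Int := (2, 1)

-- ===== CLAIM (what is proved, stated in full; the proofs are below) =====
def Claim_unchanged_moveSpace : Prop := ∀ (str : List String), Dom_moveSpace str → Spec_moveSpace str (moveSpace str)
def Claim_changed_moveSpace : Prop := Dom_moveSpace (pvDiffWitness_moveSpace) ∧ D_moveSpace (pvDiffWitness_moveSpace) ∧ moveSpace (pvDiffWitness_moveSpace) = pvDiffWitnessOut_moveSpace.1 ∧ moveSpace_alt (pvDiffWitness_moveSpace) = pvDiffWitnessOut_moveSpace.2 ∧ pvDiffWitnessOut_moveSpace.1 ≠ pvDiffWitnessOut_moveSpace.2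
def Claim_exact_moveSpace : Prop := ∀ (str : List String), Dom_moveSpace str → D_moveSpace str → moveSpace str ≠ moveSpace_alt str

-- ===== LEMMAS AND PROOFS =====

-- dropping the takeWhile prefix is dropWhile
theorem pv_drop_len_takeWhile {α : Type} (p : α → Bool) (l : List α) :
    l.drop (l.takeWhile p).length = l.dropWhile p := by
  induction l with
  | nil => rfl
  | cons a t ih =>
    by_cases h : p a = true <;> simp [List.takeWhile_cons, List.dropWhile_cons, h, ih]

theorem pv_skip_eq : ∀ (fuel : Nat) (arr : List String) (i : Nat), arr.length - i < fuel →
    pvSkip fuel arr i = i + ((arr.drop i).takeWhile (fun x => x == " ")).length := by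
  intro fuel
  induction fuel with
  | zero => intro arr i h; omega
  | succ n ih =>
    intro arr i h
    by_cases hg : i < arr.length ∧ arr.getD i "" = " "
    · have hi := hg.1
      have hx : arr[i] = " " := by
        have := hg.2
        rwa [List.getD_eq_getElem?_getD, List.getElem?_eq_getElem hi, Option.getD_some] at this
      rw [pvSkip, if_pos hg, ih arr (i+1) (by omega),
        List.drop_eq_getElem_cons hi, List.takeWhile_cons]
      simp [hx]
      omega
    · rw [pvSkip, if_neg hg]
      rcases Nat.lt_or_ge i arr.length with hi | hi
      · have hx : arr[i] ≠ " " := by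
          intro hc
          exact hg ⟨hi, by rw [List.getD_eq_getElem?_getD, List.getElem?_eq_getElem hi, Option.getD_some]; exact hc⟩
        rw [List.drop_eq_getElem_cons hi, List.takeWhile_cons]
        simp [hx]
      · rw [List.drop_eq_nil_iff.mpr hi]
        simp

theorem pv_copy_spec : ∀ (fuel : Nat) (arr : List String) (s i : Nat), arr.length - i < fuel → s ≤ i →
    (pvCopy fuel arr s i).2.1 = s + ((arr.drop i).takeWhile (fun x => x != " ")).length
  ∧ (pvCopy fuel arr s i).2.2 = i + ((arr.drop i).takeWhile (fun x => x != " ")).length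
  ∧ (pvCopy fuel arr s i).1.length = arr.length
  ∧ (pvCopy fuel arr s i).1.drop (i + ((arr.drop i).takeWhile (fun x => x != " ")).length)
      = arr.drop (i + ((arr.drop i).takeWhile (fun x => x != " ")).length) := by
  intro fuel
  induction fuel with
  | zero => intro arr s i h hs; omega
  | succ n ih =>
    intro arr s i h hs
    by_cases hg : i < arr.length ∧ ¬ arr.getD i "" = " "
    · have hi := hg.1
      have hx : arr.getD i "" = arr[i] := by
        rw [List.getD_eq_getElem?_getD, List.getElem?_eq_getElem hi, Option.getD_some]
      have hxne : (arr[i] != " ") = true := by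
        have := hg.2; rw [hx] at this; simpa using this
      have hdw : (arr.drop i).takeWhile (fun x => x != " ")
          = arr[i] :: ((arr.drop (i+1)).takeWhile (fun x => x != " ")) := by
        rw [List.drop_eq_getElem_cons hi, List.takeWhile_cons, if_pos hxne]
      have hset : ∀ m, i < m → (arr.set s (arr.getD i "")).drop m = arr.drop m := by
        intro m hm
        rw [List.drop_set, if_pos (by omega)]
      have hlen : (arr.set s (arr.getD i "")).length = arr.length := List.length_set
      have hrec := ih (arr.set s (arr.getD i "")) (s+1) (i+1) (by omega) (by omega)
      rw [hset (i+1) (by omega)] at hrec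
      rw [pvCopy, if_pos hg]
      refine ⟨?_, ?_, ?_, ?_⟩
      · rw [hrec.1, hdw]; simp; omega
      · rw [hrec.2.1, hdw]; simp; omega
      · rw [hrec.2.2.1, hlen]
      · have h4 := hrec.2.2.2
        rw [hset ((i+1) + ((arr.drop (i+1)).takeWhile (fun x => x != " ")).length) (by omega)] at h4
        rw [hdw]
        simpa [Nat.add_comm, Nat.add_assoc, Nat.add_left_comm] using h4
    · rw [pvCopy, if_neg hg]
      have hk : ((arr.drop i).takeWhile (fun x => x != " ")).length = 0 := by
        rcases Nat.lt_or_ge i arr.length with hi | hi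
        · have hx : arr.getD i "" = arr[i] := by
            rw [List.getD_eq_getElem?_getD, List.getElem?_eq_getElem hi, Option.getD_some]
          have : arr[i] = " " := by
            by_contra hc
            exact hg ⟨hi, by rw [hx]; exact hc⟩
          rw [List.drop_eq_getElem_cons hi, List.takeWhile_cons]
          simp [this]
        · rw [List.drop_eq_nil_iff.mpr hi]; simp
      rw [hk]
      simp

-- set at an in-range position, then drop from it
theorem pv_drop_set_self {α : Type} (l : List α) (n : Nat) (a : α) (h : n < l.length) :
    (l.set n a).drop n = a :: l.drop (n+1) := by
  rw [List.drop_eq_getElem_cons (by simpa using h), List.getElem_set_self, List.drop_set,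
    if_pos (by omega)]

-- head of a non-empty dropWhile result falsifies the predicate (cons form)
theorem pv_head_dropWhile {α : Type} (p : α → Bool) :
    ∀ (l : List α) (x : α) (t : List α), l.dropWhile p = x :: t → p x = false := by
  intro l
  induction l with
  | nil => intro x t h; simp at h
  | cons a l ih =>
    intro x t h
    rw [List.dropWhile_cons] at h
    by_cases ha : p a = true
    · rw [if_pos ha] at h
      exact ih x t h
    · rw [if_neg ha] at h
      cases h
      simpa using ha

-- termination/structure helper for wordsOf and gval
theorem pv_drop2_lt (l : List String) (h : ¬ l.dropWhile (fun x => x == " ") = []) :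
    ((l.dropWhile (fun x => x == " ")).dropWhile (fun x => x != " ")).length < l.length := by
  rcases h1 : l.dropWhile (fun x => x == " ") with _ | ⟨x, t⟩
  · exact absurd h1 h
  · have hx : (x == " ") = false := pv_head_dropWhile _ l x t h1
    have h2 : (x :: t).dropWhile (fun x => x != " ") = t.dropWhile (fun x => x != " ") := by
      rw [List.dropWhile_cons, if_pos (by simp; intro hc; rw [hc] at hx; simp at hx)]
    have h3 := List.length_dropWhile_le (fun x : String => x != " ") t
    have h4 := List.length_dropWhile_le (fun x : String => x == " ") l
    rw [h1] at h4
    rw [h2]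
    simp at h4 ⊢
    omega

-- the words (maximal runs of non-space elements) of a list
def wordsOf (l : List String) : List (List String) :=
  if h : l.dropWhile (fun x => x == " ") = [] then []
  else ((l.dropWhile (fun x => x == " ")).takeWhile (fun x => x != " ")) ::
       wordsOf ((l.dropWhile (fun x => x == " ")).dropWhile (fun x => x != " "))
termination_by l.length
decreasing_by exact pv_drop2_lt l h

-- the value A's outer loop adds to `start`, on the pure suffix
def gval (l : List String) : Nat :=
  if h : l.dropWhile (fun x => x == " ") = [] then 0
  else ((l.dropWhile (fun x => x == " ")).takeWhile (fun x => x != " ")).length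
     + (if (l.dropWhile (fun x => x == " ")).dropWhile (fun x => x != " ") = [] then 0 else 1)
     + gval ((l.dropWhile (fun x => x == " ")).dropWhile (fun x => x != " "))
termination_by l.length
decreasing_by exact pv_drop2_lt l h

theorem wordsOf_nil : wordsOf [] = [] := by rw [wordsOf]; simp

theorem gval_nil : gval [] = 0 := by rw [gval]; simp

theorem pv_outer_eq : ∀ (n : Nat) (arr : List String) (s i : Nat),
    arr.length - i < n → s ≤ pvSkip (arr.length+1) arr i →
    pvOuter n arr s i = s + gval (arr.drop i) := by
  intro n
  induction n with
  | zero => intro arr s i h _; omega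
  | succ m ih =>
    intro arr s i h hs
    by_cases hi : i < arr.length
    · rw [pv_skip_eq (arr.length+1) arr i (by omega)] at hs
      set a := ((arr.drop i).takeWhile (fun x => x == " ")).length with ha
      have hle : a ≤ arr.length - i := by
        have h1 := (List.takeWhile_prefix (p := fun x : String => x == " ")
          (l := arr.drop i)).length_le
        simpa using h1
      have hidx1 : pvSkip (arr.length+1) arr i = i + a := pv_skip_eq _ arr i (by omega)
      have hdrop1 : arr.drop (i + a) = (arr.drop i).dropWhile (fun x => x == " ") := by
        rw [← List.drop_drop, ha, pv_drop_len_takeWhile]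
      set l1 := (arr.drop i).dropWhile (fun x => x == " ") with hl1
      set k := (l1.takeWhile (fun x => x != " ")).length with hk
      have hcs := pv_copy_spec (arr.length+1) arr s (i+a) (by omega) (by omega)
      rw [hdrop1] at hcs
      have hdropr : arr.drop (i + a + k) = l1.dropWhile (fun x => x != " ") := by
        rw [← List.drop_drop, hdrop1, hk, pv_drop_len_takeWhile]
      set r := l1.dropWhile (fun x => x != " ") with hr
      -- unfold the outer loop one step
      rcases hc : pvCopy (arr.length+1) arr s (pvSkip (arr.length+1) arr i) with ⟨c1, c2, c3⟩
      rw [hidx1] at hc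
      rw [hc] at hcs
      have hc2 : c2 = s + k := hcs.1
      have hc3 : c3 = i + a + k := by have := hcs.2.1; simpa [Nat.add_assoc] using this
      have hclen : c1.length = arr.length := hcs.2.2.1
      have hcdrop : c1.drop (i + a + k) = r := by
        have := hcs.2.2.2; rw [← hdropr]; simpa [Nat.add_assoc] using this
      -- gval on the suffix
      have hgval : gval (arr.drop i) = if l1 = [] then 0
          else k + (if r = [] then 0 else 1) + gval r := by
        rw [gval]
        by_cases h0 : l1 = [] <;> simp [← hl1, ← hk, ← hr, h0]
      rw [pvOuter, if_pos hi, hidx1, hc]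
      change (if c3 < c1.length then pvOuter m (c1.set c2 " ") (c2+1) c3 else c2)
        = s + gval (List.drop i arr)
      by_cases hrnil : r = []
      · -- loop ends: idx2 = end of array or no further word
        have hknil : ¬ (c3 < c1.length) := by
          rw [hc3, hclen]
          have : arr.drop (i + a + k) = [] := by rw [hdropr]; exact hrnil
          rw [List.drop_eq_nil_iff] at this
          omega
        rw [if_neg hknil, hc2, hgval]
        by_cases h0 : l1 = []
        · have : k = 0 := by rw [hk, h0]; simp
          rw [if_pos h0, this]
        · rw [if_neg h0, if_pos hrnil, hrnil, gval_nil]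
          omega
      · -- another word follows: write a space and continue
        have hl1ne : ¬ l1 = [] := by
          intro hcon
          apply hrnil
          rw [hr, hcon]
          rfl
        have hrhead : ∃ tl, r = " " :: tl := by
          rcases h1 : r with _ | ⟨y, tl⟩
          · exact absurd h1 hrnil
          · have hy := pv_head_dropWhile (fun x : String => x != " ") l1 y tl (by rw [← hr]; exact h1)
            simp at hy
            exact ⟨tl, by rw [hy]⟩
        rcases hrhead with ⟨tl, htl⟩
        have hkpos : 1 ≤ k := by
          rcases h1 : l1 with _ | ⟨y, t1⟩
          · exact absurd h1 hl1ne
          · have hy : (y == " ") = false :=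
              pv_head_dropWhile (fun x : String => x == " ") (arr.drop i) y t1 (by rw [← hl1]; exact h1)
            have hy2 : (y != " ") = true := by
              simp; intro hcon; rw [hcon] at hy; simp at hy
            rw [hk, h1, List.takeWhile_cons, if_pos hy2]
            simp
        have hc3lt : c3 < c1.length := by
          rw [hc3, hclen]
          have : ¬ arr.drop (i + a + k) = [] := by rw [hdropr]; exact hrnil
          rw [List.drop_eq_nil_iff] at this
          omega
        rw [if_pos hc3lt]
        -- the array after writing the separator space, seen from idx2
        have hdrop3 : (c1.set c2 " ").drop c3 = r := by
          rcases Nat.lt_or_ge c2 c3 with hlt | hge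
          · rw [List.drop_set, if_pos hlt, hc3]
            exact hcdrop
          · have hceq : c2 = c3 := by omega
            rw [hceq, pv_drop_set_self c1 c3 " " (by omega)]
            have : c1.drop c3 = r := by rw [hc3]; exact hcdrop
            rw [htl] at this
            rw [htl]
            have htail : c1.drop (c3 + 1) = tl := by
              have h5 : (c1.drop c3).tail = (" " :: tl).tail := by rw [this]
              simpa [List.tail_drop] using h5
            rw [htail]
        have hskip3 : c2 + 1 ≤ pvSkip ((c1.set c2 " ").length+1) (c1.set c2 " ") c3 := by
          rw [pv_skip_eq _ _ c3 (by simp [List.length_set]), hdrop3, htl,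
            List.takeWhile_cons, if_pos (by simp)]
          simp
          omega
        have hrec := ih (c1.set c2 " ") (c2+1) c3
          (by simp [List.length_set]; rw [hclen, hc3]; omega) hskip3
        rw [hrec, hdrop3, hgval, if_neg hl1ne, if_neg hrnil, hc2]
        omega
    · rw [pvOuter, if_neg hi]
      rw [List.drop_eq_nil_iff.mpr (by omega), gval_nil]
      omega

-- ===== B-side lemmas =====

theorem pv_dropWhile_word_append (w rest : List String) (h0 : w ≠ [])
    (hw : ∀ x ∈ w, ¬ x = " ") :
    (w ++ rest).dropWhile (fun x => x == " ") = w ++ rest := by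
  rcases w with _ | ⟨c, w'⟩
  · exact absurd rfl h0
  · have : (c == " ") = false := by
      have := hw c (by simp); simp [this]
    simp [List.dropWhile_cons, this]

theorem pv_takeWhile_word_append (w rest : List String) (hw : ∀ x ∈ w, ¬ x = " ") :
    (w ++ rest).takeWhile (fun x => x != " ") = w ++ rest.takeWhile (fun x => x != " ")
  ∧ (w ++ rest).dropWhile (fun x => x != " ") = rest.dropWhile (fun x => x != " ") := by
  induction w with
  | nil => simp
  | cons c w' ih =>
    have hc : (c != " ") = true := by
      have := hw c (by simp); simp [this]
    have ih' := ih (fun x hx => hw x (by simp [hx]))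
    constructor
    · simp only [List.cons_append, List.takeWhile_cons, if_pos hc, ih'.1]
    · simp only [List.cons_append, List.dropWhile_cons, if_pos hc, ih'.2]

theorem wordsOf_cons_space (t : List String) : wordsOf (" " :: t) = wordsOf t := by
  rw [wordsOf]
  rw [show wordsOf t = (if h : t.dropWhile (fun x => x == " ") = [] then []
    else ((t.dropWhile (fun x => x == " ")).takeWhile (fun x => x != " ")) ::
       wordsOf ((t.dropWhile (fun x => x == " ")).dropWhile (fun x => x != " "))) from by
      rw [wordsOf]]
  simp [List.dropWhile_cons]

theorem wordsOf_word (w : List String) (h0 : w ≠ []) (hw : ∀ x ∈ w, ¬ x = " ") :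
    wordsOf w = [w] := by
  rw [wordsOf]
  have h1 : w.dropWhile (fun x => x == " ") = w := by
    have := pv_dropWhile_word_append w [] h0 hw
    simpa using this
  have h2 := pv_takeWhile_word_append w [] hw
  simp only [List.append_nil] at h2
  rw [dif_neg (by rw [h1]; exact h0), h1, h2.1, h2.2]
  simp [wordsOf_nil]

theorem wordsOf_word_space (w t : List String) (h0 : w ≠ []) (hw : ∀ x ∈ w, ¬ x = " ") :
    wordsOf (w ++ " " :: t) = w :: wordsOf t := by
  rw [wordsOf]
  have h1 := pv_dropWhile_word_append w (" " :: t) h0 hw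
  have h2 := pv_takeWhile_word_append w (" " :: t) hw
  have h3 : (" " :: t).takeWhile (fun x : String => x != " ") = [] := by
    simp [List.takeWhile_cons]
  have h4 : (" " :: t).dropWhile (fun x : String => x != " ") = " " :: t := by
    simp [List.dropWhile_cons]
  rw [dif_neg (by rw [h1]; simp [h0]), h1, h2.1, h2.2, h3, h4, List.append_nil,
    wordsOf_cons_space]

theorem pv_foldl_wordsOf : ∀ (rest : List String) (ws : List (List String)) (cur : List String),
    (∀ x ∈ cur, ¬ x = " ") →
    (if (rest.foldl pvStep (ws, cur)).2 = [] then (rest.foldl pvStep (ws, cur)).1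
     else (rest.foldl pvStep (ws, cur)).1 ++ [(rest.foldl pvStep (ws, cur)).2])
    = ws ++ (if cur = [] then wordsOf rest else wordsOf (cur ++ rest)) := by
  intro rest
  induction rest with
  | nil =>
    intro ws cur hcur
    by_cases h0 : cur = []
    · simp [h0, wordsOf_nil]
    · simp only [List.foldl_nil, if_neg h0]
      rw [List.append_nil, wordsOf_word cur h0 hcur]
  | cons c t ih =>
    intro ws cur hcur
    by_cases hc : c = " "
    · by_cases h0 : cur = []
      · have hstep : pvStep (ws, cur) c = (ws, cur) := by
          simp [pvStep, hc, h0]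
        rw [List.foldl_cons, hstep, ih ws cur hcur, if_pos h0, if_pos h0, hc,
          wordsOf_cons_space]
      · have hstep : pvStep (ws, cur) c = (ws ++ [cur], []) := by
          simp [pvStep, hc, h0]
        rw [List.foldl_cons, hstep, ih (ws ++ [cur]) [] (by simp), if_neg h0, hc,
          wordsOf_word_space cur t h0 hcur]
        simp
    · have hstep : pvStep (ws, cur) c = (ws, cur ++ [c]) := by
        simp [pvStep, hc]
      have hcur' : ∀ x ∈ cur ++ [c], ¬ x = " " := by
        intro x hx
        rcases List.mem_append.mp hx with h | h
        · exact hcur x h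
        · simp at h; rw [h]; exact hc
      rw [List.foldl_cons, hstep, ih ws (cur ++ [c]) hcur', if_neg (by simp)]
      by_cases h0 : cur = []
      · simp [h0]
      · rw [if_neg h0]
        simp
    
theorem pv_sum_int (ws : List (List String)) :
    (ws.map (fun w => (w.length : Int))).sum = (((ws.map List.length).sum : Nat) : Int) := by
  induction ws with
  | nil => simp
  | cons w t ih => simp [ih]

theorem moveSpace_alt_eq (l : List String) :
    moveSpace_alt l
      = (((((wordsOf l).map List.length).sum + ((wordsOf l).length - 1)) : Nat) : Int) := by
  have hw : (if (l.foldl pvStep ([], [])).2 = [] then (l.foldl pvStep ([], [])).1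
      else (l.foldl pvStep ([], [])).1 ++ [(l.foldl pvStep ([], [])).2]) = wordsOf l := by
    simpa using pv_foldl_wordsOf l [] [] (by simp)
  simp only [moveSpace_alt]
  rw [hw, pv_sum_int]
  rcases h : wordsOf l with _ | ⟨w, t⟩
  · simp
  · simp only [List.length_cons]
    push_cast
    rw [Int.max_def]
    split_ifs <;> omega

theorem moveSpace_eq (l : List String) : moveSpace l = ((gval l : Nat) : Int) := by
  unfold moveSpace
  rw [pv_outer_eq (l.length+1) l 0 0 (by omega) (Nat.zero_le _), List.drop_zero]
  simp

-- the change region in terms of the scan: a word exists iff dropping spaces leaves something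
theorem pv_hasword_iff (l : List String) :
    (¬ l.dropWhile (fun x => x == " ") = []) ↔ ∃ x ∈ l, x ≠ " " := by
  rw [List.dropWhile_eq_nil_iff]
  constructor
  · intro h
    by_contra hc
    push_neg at hc
    exact h (fun x hx => by simp [hc x hx])
  · rintro ⟨x, hx, hne⟩ hall
    have := hall x hx
    simp at this
    exact hne this

theorem gval_words_aux : ∀ (n : Nat) (l : List String), l.length ≤ n →
    gval l = ((wordsOf l).map List.length).sum + ((wordsOf l).length - 1)
      + (if (¬ l.dropWhile (fun x => x == " ") = []) ∧ l.getLast? = some " " then 1 else 0) := by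
  intro n
  induction n with
  | zero =>
    intro l h
    have : l = [] := List.length_eq_zero_iff.mp (by omega)
    subst this
    simp [gval_nil, wordsOf_nil]
  | succ m ih =>
    intro l hlen
    by_cases h1 : l.dropWhile (fun x => x == " ") = []
    · rw [gval, dif_pos h1, wordsOf, dif_pos h1]
      simp [h1]
    · set l1 := l.dropWhile (fun x => x == " ") with hl1
      set w := l1.takeWhile (fun x => x != " ") with hwdef
      set r := l1.dropWhile (fun x => x != " ") with hrdef
      have hsplit1 : l.takeWhile (fun x => x == " ") ++ l1 = l := List.takeWhile_append_dropWhile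
      have hsplit2 : w ++ r = l1 := List.takeWhile_append_dropWhile
      have hwne : w ≠ [] := by
        rcases hc : l1 with _ | ⟨y, t1⟩
        · exact absurd hc h1
        · have hy : (y == " ") = false :=
            pv_head_dropWhile (fun x : String => x == " ") l y t1 (by rw [← hl1]; exact hc)
          have hy2 : (y != " ") = true := by
            simp; intro hcon; rw [hcon] at hy; simp at hy
          rw [hwdef, hc, List.takeWhile_cons, if_pos hy2]
          simp
      have hwall : ∀ x ∈ w, ¬ x = " " := by
        intro x hx
        have := List.mem_takeWhile_imp (hwdef ▸ hx)
        simpa using this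
      have hgl : gval l = w.length + (if r = [] then 0 else 1) + gval r := by
        rw [gval, dif_neg h1]
      have hwl : wordsOf l = w :: wordsOf r := by
        rw [wordsOf, dif_neg h1]
      by_cases hr : r = []
      · -- no later word and no trailing space: last element of l is the last of w
        have hlw : l = l.takeWhile (fun x => x == " ") ++ w := by
          conv_lhs => rw [← hsplit1]
          rw [← hsplit2, hr, List.append_nil]
        have hlast : l.getLast? = w.getLast? := by
          rw [hlw]
          exact List.getLast?_append_of_ne_nil _ hwne
        have hlastw : ∀ y, w.getLast? = some y → y ≠ " " := by
          intro y hy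
          have hym : y ∈ w := by
            rcases w with _ | ⟨a, b⟩
            · simp at hy
            · have := List.getLast?_eq_getLast_of_ne_nil (l := a :: b) (by simp)
              rw [this] at hy
              have hmem := List.getLast_mem (l := a :: b) (by simp)
              have hgl2 := Option.some_inj.mp hy
              rw [← hgl2]
              exact hmem
          exact hwall y hym
        have hq : (if (¬ l.dropWhile (fun x => x == " ") = []) ∧ l.getLast? = some " "
            then 1 else 0) = 0 := by
          rw [if_neg]
          rintro ⟨-, hlastl⟩
          rw [hlast] at hlastl
          exact hlastw " " hlastl rfl
        rw [hgl, hwl, hr, gval_nil, wordsOf_nil, hq]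
        simp
      · have hrlt : r.length < l.length := by
          have h4 := List.length_dropWhile_le (fun x : String => x == " ") l
          have : w.length + r.length = l1.length := by
            rw [← hsplit2]; simp
          rcases w with _ | ⟨a, b⟩
          · exact absurd rfl hwne
          · simp at this
            rw [← hl1] at h4
            omega
        have hih := ih r (by omega)
        have hlastlr : l.getLast? = r.getLast? := by
          conv_lhs => rw [← hsplit1, ← hsplit2]
          rw [List.getLast?_append_of_ne_nil _ (by simp [hr])]
          exact List.getLast?_append_of_ne_nil _ hr
        by_cases hr2 : r.dropWhile (fun x => x == " ") = []
        · -- r is all spaces: A writes one trailing space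
          have hrall : ∀ x ∈ r, x = " " := by
            intro x hx
            have := List.dropWhile_eq_nil_iff.mp hr2 x hx
            simpa using this
          have hlastr : r.getLast? = some " " := by
            rcases r with _ | ⟨a, b⟩
            · exact absurd rfl hr
            · rw [List.getLast?_eq_getLast_of_ne_nil (by simp)]
              have := List.getLast_mem (l := a :: b) (by simp)
              rw [hrall _ this]
          have hgr : gval r = 0 := by rw [gval, dif_pos hr2]
          have hwr : wordsOf r = [] := by rw [wordsOf, dif_pos hr2]
          have hq : (if (¬ l.dropWhile (fun x => x == " ") = []) ∧ l.getLast? = some " "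
              then 1 else 0) = 1 := by
            rw [if_pos ⟨h1, by rw [hlastlr]; exact hlastr⟩]
          rw [hgl, hwl, hgr, hwr, hq, if_neg hr]
          simp
        · have hwr : wordsOf r ≠ [] := by
            rw [wordsOf, dif_neg hr2]; simp
          have hq : (if (¬ l.dropWhile (fun x => x == " ") = []) ∧ l.getLast? = some " "
                then 1 else 0)
              = (if (¬ r.dropWhile (fun x => x == " ") = []) ∧ r.getLast? = some " "
                then 1 else 0) := by
            rw [hlastlr]
            by_cases hlr : r.getLast? = some " "
            · rw [if_pos ⟨h1, hlr⟩, if_pos ⟨hr2, hlr⟩]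
            · rw [if_neg (by rintro ⟨-, h⟩; exact hlr h), if_neg (by rintro ⟨-, h⟩; exact hlr h)]
          rw [hgl, hwl, hih, hq, if_neg hr]
          rcases hc : wordsOf r with _ | ⟨u, v⟩
          · exact absurd hc hwr
          · simp [hc]
            omega

theorem gval_words (l : List String) :
    gval l = ((wordsOf l).map List.length).sum + ((wordsOf l).length - 1)
      + (if (¬ l.dropWhile (fun x => x == " ") = []) ∧ l.getLast? = some " " then 1 else 0) :=
  gval_words_aux l.length l (le_refl _)

-- ===== VERDICT (by name: the statement is the Claim_ definition above) =====
theorem moveSpace_spec : Claim_unchanged_moveSpace := by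
  intro l _ hnD
  rw [moveSpace_eq, moveSpace_alt_eq, gval_words]
  have hq : (if (¬ l.dropWhile (fun x => x == " ") = []) ∧ l.getLast? = some " "
      then 1 else 0) = 0 := by
    rw [if_neg]
    rintro ⟨h1, h2⟩
    exact hnD ⟨(pv_hasword_iff l).mp h1, h2⟩
  rw [hq]
  simp

theorem moveSpace_changed : Claim_changed_moveSpace := by
  unfold Claim_changed_moveSpace; decide

theorem moveSpace_tight : Claim_exact_moveSpace := by
  intro l _ hD
  rw [moveSpace_eq, moveSpace_alt_eq, gval_words]
  have hq : (if (¬ l.dropWhile (fun x => x == " ") = []) ∧ l.getLast? = some " "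
      then 1 else 0) = 1 := by
    rw [if_pos ⟨(pv_hasword_iff l).mpr hD.1, hD.2⟩]
  rw [hq]
  intro hc
  have := Int.ofNat.inj hc
  omega
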